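-- pv_equiv track=rewrite | github.com/peresolb/preprocess-asr | clean_ref.py | identify_sentend
-- ===== SOURCE A (Python) =====
-- def identify_sentend(mylist):
-- 	returnlist = []
-- 	sentdividers = ['!', '?', '.', ':']
-- 	for n in range(len(mylist)):
-- 		token = mylist[n]
-- 		if n == len(mylist)-1:
-- 			returnlist.append(token)
-- 		else:
-- 			nexttoken = mylist[n+1]
-- 			if nexttoken in sentdividers:
-- 				returnlist.append("[endtok]")
-- 			else:
-- 				returnlist.append(token)
-- 	return returnlist
-- ===== SOURCE B (Python) =====
-- def identify_sentend(mylist):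
--     sentdividers = {'!', '?', '.', ':'}
--     out = []
--     following = None
--     for token in reversed(mylist):
--         out.append("[endtok]" if following in sentdividers else token)
--         following = token
--     out.reverse()
--     return out
-- ===== Notes on version B (the rewrite author's own statement) =====
-- stated objective: alternative
-- what changed: Replaces A's indexed forward scan with look-ahead (mylist[n+1]) by an index-free reverse traversal that carries the previously seen token ('following') as fold state and reverses the accumulator at the end.
import Mathlib
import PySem

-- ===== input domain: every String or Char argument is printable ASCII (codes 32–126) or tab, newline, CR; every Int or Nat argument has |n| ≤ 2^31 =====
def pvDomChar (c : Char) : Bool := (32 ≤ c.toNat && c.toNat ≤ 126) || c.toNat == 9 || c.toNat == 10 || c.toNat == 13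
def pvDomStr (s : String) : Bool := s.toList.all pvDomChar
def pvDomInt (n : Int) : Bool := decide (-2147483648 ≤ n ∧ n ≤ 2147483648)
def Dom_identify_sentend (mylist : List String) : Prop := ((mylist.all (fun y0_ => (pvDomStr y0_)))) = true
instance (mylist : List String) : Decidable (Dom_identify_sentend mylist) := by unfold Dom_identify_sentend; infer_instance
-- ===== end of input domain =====

-- B replaces A's indexed forward scan with look-ahead by an index-free reverse traversal
-- carrying the previously seen token as fold state; same return value, proved below.

-- ===== PORT A =====
def identify_sentend (mylist : List String) : List String :=
  let returnlist : List String := []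
  let sentdividers : List String := ["!", "?", ".", ":"]
  (PySem.List.pyRange 0 (mylist.length : Int) 1).foldl (fun returnlist n =>
    let token := PySem.List.pyGetD mylist n ""
    if n = (mylist.length : Int) - 1 then
      returnlist ++ [token]
    else
      let nexttoken := PySem.List.pyGetD mylist (n + 1) ""
      if nexttoken ∈ sentdividers then
        returnlist ++ ["[endtok]"]
      else
        returnlist ++ [token]) returnlist

-- ===== PORT B =====
-- Python's `"[endtok]" if following in sentdividers else token` where `following` is
-- None before the first iteration: a None `following` is never in the string set.
def pvPick (following : Option String) (token : String) : String :=
  match following with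
  | some f => if f ∈ (PySem.Set.ofList ["!", "?", ".", ":"] : PySem.Set String) then "[endtok]" else token
  | none => token

def identify_sentend_alt (mylist : List String) : List String :=
  ((mylist.reverse.foldl
      (fun (st : List String × Option String) token =>
        (st.1 ++ [pvPick st.2 token], some token))
      ([], none)).1).reverse

-- ===== PRECONDITION & SPEC =====
def Spec_identify_sentend (mylist : List String) (out : List String) : Prop := out = identify_sentend_alt mylist
instance (mylist : List String) (out : List String) : Decidable (Spec_identify_sentend mylist out) := by unfold Spec_identify_sentend; infer_instance

-- ===== CLAIM (what is proved, stated in full; the proofs are below) =====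
def Claim_equal_identify_sentend : Prop := ∀ (mylist : List String), Dom_identify_sentend mylist → Spec_identify_sentend mylist (identify_sentend mylist)

-- ===== LEMMAS AND PROOFS =====

-- the single string A appends for (integer) index n
def pvAElem (mylist : List String) (n : Int) : String :=
  if n = (mylist.length : Int) - 1 then PySem.List.pyGetD mylist n ""
  else if PySem.List.pyGetD mylist (n + 1) "" ∈ (["!", "?", ".", ":"] : List String) then "[endtok]"
  else PySem.List.pyGetD mylist n ""

lemma pvA_eq_map (mylist : List String) :
    identify_sentend mylist = (List.range mylist.length).map (fun k : Nat => pvAElem mylist (k : Int)) := by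
  unfold identify_sentend
  rw [PySem.List.pyRange_one, List.foldl_map]
  have key : (List.range (((mylist.length : Int)) - 0).toNat).foldl
      (fun (returnlist : List String) (k : Nat) =>
        let token := PySem.List.pyGetD mylist ((0 : Int) + (k : Int)) ""
        if (0 : Int) + (k : Int) = (mylist.length : Int) - 1 then returnlist ++ [token]
        else
          let nexttoken := PySem.List.pyGetD mylist ((0 : Int) + (k : Int) + 1) ""
          if nexttoken ∈ (["!", "?", ".", ":"] : List String) then returnlist ++ ["[endtok]"]
          else returnlist ++ [token]) []
      = (List.range (((mylist.length : Int)) - 0).toNat).foldl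
        (fun (acc : List String) (k : Nat) => acc ++ [pvAElem mylist (k : Int)]) [] := by
    apply PySem.List.foldl_congr_mem
    intro acc k _
    simp only [pvAElem, zero_add]
    split_ifs <;> rfl
  rw [key, PySem.List.foldl_append_singleton_eq_map]
  simp

-- B's output before the final reverse, as structural recursion on the traversed list
def pvBuild : List String → Option String → List String
  | [], _ => []
  | t :: ts, f => pvPick f t :: pvBuild ts (some t)

lemma pvB_fold_build (rs : List String) :
    ∀ (acc : List String) (f : Option String),
      (rs.foldl (fun (st : List String × Option String) token =>
          (st.1 ++ [pvPick st.2 token], some token)) (acc, f)).1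
        = acc ++ pvBuild rs f := by
  induction rs with
  | nil => intro acc f; simp [pvBuild]
  | cons t ts ih => intro acc f; simp [pvBuild, ih]

lemma pvBuild_zip (rs : List String) :
    ∀ (f : Option String), pvBuild rs f = List.zipWith pvPick (f :: rs.map some) rs := by
  induction rs with
  | nil => intro f; rfl
  | cons t ts ih => intro f; simp [pvBuild, ih]

lemma pvB_eq (mylist : List String) :
    identify_sentend_alt mylist
      = (List.zipWith pvPick (none :: mylist.reverse.map some) mylist.reverse).reverse := by
  unfold identify_sentend_alt
  rw [pvB_fold_build, pvBuild_zip]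
  rfl

lemma pvB_length (mylist : List String) :
    (identify_sentend_alt mylist).length = mylist.length := by
  rw [pvB_eq]; simp

lemma pvA_length (mylist : List String) :
    (identify_sentend mylist).length = mylist.length := by
  rw [pvA_eq_map]; simp

theorem identify_sentend_spec : Claim_equal_identify_sentend := by
  intro mylist _
  unfold Spec_identify_sentend
  apply List.ext_getElem
  · rw [pvA_length, pvB_length]
  · intro j hjA hjB
    have hj : j < mylist.length := by rw [pvA_length] at hjA; exact hjA
    have hA : (identify_sentend mylist)[j] = pvAElem mylist (j : Int) := by
      simp [pvA_eq_map]
    set n := mylist.length with hn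
    have hzlen : (List.zipWith pvPick (none :: mylist.reverse.map some) mylist.reverse).length = n := by
      simp; omega
    have hB : (identify_sentend_alt mylist)[j]
        = pvPick ((none :: mylist.reverse.map some)[n - 1 - j]'(by simp; omega))
                 (mylist.reverse[n - 1 - j]'(by simp; omega)) := by
      have h1 : (identify_sentend_alt mylist)[j]
          = (List.zipWith pvPick (none :: mylist.reverse.map some) mylist.reverse).reverse[j]'(by
              rw [List.length_reverse, hzlen]; omega) := by
        have := pvB_eq mylist
        exact List.getElem_of_eq this _
      rw [h1, List.getElem_reverse, List.getElem_zipWith]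
      congr 1 <;> congr 1 <;> rw [hzlen]
    rw [hA, hB]
    simp only [pvAElem]
    by_cases hlast : j = n - 1
    · have hz : n - 1 - j = 0 := by omega
      rw [if_pos (by omega : (j : Int) = (n : Int) - 1)]
      simp only [hz, List.getElem_cons_zero, pvPick, List.getElem_reverse]
      have g0 : ∀ (k : Nat) (h : k < mylist.length), mylist[k]'h = mylist.getD k "" :=
        fun k h => (List.getD_eq_getElem _ _ h).symm
      simp only [g0]
      rw [show mylist.length - 1 - 0 = j by omega, PySem.List.pyGetD_natCast]
    · have hjlt : j < n - 1 := by omega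
      have hpos : n - 1 - j = (n - 2 - j) + 1 := by omega
      rw [if_neg (by omega : ¬ ((j : Int) = (n : Int) - 1))]
      simp only [hpos, List.getElem_cons_succ, List.getElem_map, List.getElem_reverse, pvPick]
      have g1 : ∀ (k : Nat) (h : k < mylist.length), mylist[k]'h = mylist.getD k "" :=
        fun k h => (List.getD_eq_getElem _ _ h).symm
      simp only [g1]
      rw [show mylist.length - 1 - (n - 2 - j) = j + 1 by omega,
          show mylist.length - 1 - (n - 2 - j + 1) = j by omega]
      have hmem : (PySem.Set.ofList ["!", "?", ".", ":"] : PySem.Set String) = ["!", "?", ".", ":"] := by decide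
      have h2 : ((j : Int) + 1) = ((j + 1 : Nat) : Int) := by push_cast; ring
      rw [h2, PySem.List.pyGetD_natCast, PySem.List.pyGetD_natCast, hmem]
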